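-- pv_equiv track=rewrite | github.com/sddai/myLeetCode | OD_20_test_2.py | replace_main_chars
-- ===== SOURCE A (Python) =====
-- def replace_main_chars(main_chars, eq_chars):
--     replace_dict = {}
--     for chars in eq_chars:
--         if chars:
--             min_char = min(chars, key=lambda x: (x.lower(), x))
--             for char in chars:
--                 replace_dict[char] = min_char
--                 replace_dict[char.lower()] = min_char
--                 replace_dict[char.upper()] = min_char
--
--     result = ''.join([replace_dict.get(c, c) for c in main_chars])
--     return result if result else '0'
-- ===== SOURCE B (Python) =====
-- def replace_main_chars(main_chars, eq_chars):
--     # Per-character scan: the LAST group containing c (or a case variant of one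
--     # of its members) wins, matching the dict-overwrite semantics of the original.
--     def rep(c):
--         for group in reversed(eq_chars):
--             if any(x == c or x.lower() == c or x.upper() == c for x in group):
--                 return min(group, key=lambda x: (x.lower(), x))
--         return c
--     out = ''.join(map(rep, main_chars))
--     return out if out else '0'
-- ===== Notes on version B (the rewrite author's own statement) =====
-- stated objective: alternative
-- what changed: Replaces the precomputed replace_dict (build index, then apply) with a per-character reverse scan over the groups that picks the last matching group and takes its minimum on the fly; no dictionary is built.
import Mathlib
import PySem

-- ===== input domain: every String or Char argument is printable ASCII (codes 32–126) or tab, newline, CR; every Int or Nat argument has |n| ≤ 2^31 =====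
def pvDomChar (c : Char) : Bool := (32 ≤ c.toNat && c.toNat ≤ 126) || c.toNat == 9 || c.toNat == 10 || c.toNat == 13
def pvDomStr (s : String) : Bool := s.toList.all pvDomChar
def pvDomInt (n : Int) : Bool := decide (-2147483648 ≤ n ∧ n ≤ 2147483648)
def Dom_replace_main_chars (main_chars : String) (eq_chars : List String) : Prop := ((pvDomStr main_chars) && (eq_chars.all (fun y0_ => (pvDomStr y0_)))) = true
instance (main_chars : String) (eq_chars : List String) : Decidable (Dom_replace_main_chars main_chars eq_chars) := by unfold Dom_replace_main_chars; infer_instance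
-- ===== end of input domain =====

-- B replaces A's build-a-replace-dict-then-apply strategy with a per-character reverse
-- scan over the groups (last matching group wins, its minimum taken on the fly): an
-- alternative decomposition of similar cost, no dictionary built.


-- ===== PORT A =====
-- 'min(chars, key=lambda x: (x.lower(), x))'
def pvGroupMin (g : List Char) : Option Char :=
  PySem.List.min2? g PySem.Chars.lowerChar (fun x => x)

-- one iteration of A's outer loop: 'if chars: min_char = min(...); for char in chars: ...'
def pvInsertGroup (d : PySem.Dict Char Char) (g : List Char) : PySem.Dict Char Char :=
  if g ≠ [] then
    match pvGroupMin g with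
    | some m =>
        g.foldl (fun d ch =>
          ((d.insert ch m).insert (PySem.Chars.lowerChar ch) m).insert (PySem.Chars.upperChar ch) m) d
    | none => d   -- unreachable: g ≠ []
  else d

def replace_main_chars (main_chars : String) (eq_chars : List String) : String :=
  let d := eq_chars.foldl (fun d chars => pvInsertGroup d chars.toList) PySem.Dict.empty
  let result := main_chars.toList.map (fun c => d.getD c c)   -- ''.join([replace_dict.get(c, c) for c in main_chars])
  if result = [] then "0" else String.ofList result

-- ===== PORT B =====
-- 'any(x == c or x.lower() == c or x.upper() == c for x in group)'
def pvMatches (c : Char) (g : List Char) : Bool :=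
  g.any (fun x => x == c || PySem.Chars.lowerChar x == c || PySem.Chars.upperChar x == c)

-- 'min(group, key=lambda x: (x.lower(), x))'; default c unreachable (a found group is nonempty)
def pvMinD (g : List Char) (c : Char) : Char :=
  match PySem.List.min2? g PySem.Chars.lowerChar (fun x => x) with
  | some m => m
  | none => c

-- Source B's rep(c): first match in REVERSED group list, else c
def pvRep (eq_rev : List (List Char)) (c : Char) : Char :=
  match eq_rev.find? (pvMatches c) with
  | some g => pvMinD g c
  | none => c

def replace_main_chars_alt (main_chars : String) (eq_chars : List String) : String :=
  let out := main_chars.toList.map (pvRep ((eq_chars.map String.toList).reverse))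
  if out = [] then "0" else String.ofList out

-- ===== PRECONDITION & SPEC =====
def Spec_replace_main_chars (main_chars : String) (eq_chars : List String) (out : String) : Prop := out = replace_main_chars_alt main_chars eq_chars
instance (main_chars : String) (eq_chars : List String) (out : String) : Decidable (Spec_replace_main_chars main_chars eq_chars out) := by unfold Spec_replace_main_chars; infer_instance

-- ===== CLAIM (what is proved, stated in full; the proofs are below) =====
def Claim_equal_replace_main_chars : Prop := ∀ (main_chars : String) (eq_chars : List String), Dom_replace_main_chars main_chars eq_chars → Spec_replace_main_chars main_chars eq_chars (replace_main_chars main_chars eq_chars)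

-- ===== LEMMAS AND PROOFS =====

-- min2? of a nonempty list is some
theorem pvFoldl_ne_none {α : Type} (F : Option α → α → Option α)
    (hF : ∀ a x, F (some a) x ≠ none) :
    ∀ (l : List α) (a : α), l.foldl F (some a) ≠ none := by
  intro l
  induction l with
  | nil => intro a; simp
  | cons y t ih =>
    intro a
    simp only [List.foldl_cons]
    cases hy : F (some a) y with
    | none => exact absurd hy (hF a y)
    | some b => exact ih b

-- min2? of a nonempty list is some
theorem pvGroupMin_cons_ne_none (x : Char) (xs : List Char) : pvGroupMin (x :: xs) ≠ none := by
  unfold pvGroupMin PySem.List.min2?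
  simp only [List.foldl_cons]
  apply pvFoldl_ne_none
  intro a y
  split
  · simp
  · split <;> simp

-- lookup after one triple insert of A's inner loop body
theorem pvGetD_tripleInsert (x c c0 m : Char) (d : PySem.Dict Char Char) :
    (((d.insert x m).insert (PySem.Chars.lowerChar x) m).insert (PySem.Chars.upperChar x) m).getD c c0
      = if (x == c || PySem.Chars.lowerChar x == c || PySem.Chars.upperChar x == c) then m
        else d.getD c c0 := by
  simp only [PySem.Dict.getD_insert, Bool.or_eq_true, beq_iff_eq]
  split_ifs <;> (try subst_vars) <;> (try simp_all) <;> tauto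

-- lookup after the inner triple-insert loop: m if some group member matches c (as itself or a case variant), else the old lookup
theorem pvGetD_tripleFold (g : List Char) (m : Char) (d : PySem.Dict Char Char) (c c0 : Char) :
    (g.foldl (fun d ch =>
        ((d.insert ch m).insert (PySem.Chars.lowerChar ch) m).insert (PySem.Chars.upperChar ch) m) d).getD c c0
      = if pvMatches c g then m else d.getD c c0 := by
  induction g generalizing d with
  | nil => simp [pvMatches]
  | cons x t ih =>
    simp only [List.foldl_cons, ih, pvGetD_tripleInsert, pvMatches, List.any_cons]
    by_cases hb : t.any (fun y => y == c || PySem.Chars.lowerChar y == c || PySem.Chars.upperChar y == c) = true <;>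
      simp [hb]

-- lookup after processing one group
theorem pvGetD_insertGroup (d : PySem.Dict Char Char) (g : List Char) (c : Char) :
    (pvInsertGroup d g).getD c c = if pvMatches c g then pvMinD g c else d.getD c c := by
  unfold pvInsertGroup
  cases g with
  | nil => simp [pvMatches]
  | cons x t =>
    simp only [ne_eq, reduceCtorEq, not_false_eq_true, if_true]
    cases h : pvGroupMin (x :: t) with
    | none => exact absurd h (pvGroupMin_cons_ne_none x t)
    | some m =>
      rw [pvGetD_tripleFold]
      unfold pvMinD
      rw [show PySem.List.min2? (x :: t) PySem.Chars.lowerChar (fun x => x) = some m from h]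

-- lookup in A's finished dict = B's reverse-scan rep
theorem pvGetD_foldl_eq_rep (gs : List (List Char)) (d : PySem.Dict Char Char) (c : Char) :
    (gs.foldl pvInsertGroup d).getD c c
      = match gs.reverse.find? (pvMatches c) with
        | some g => pvMinD g c
        | none => d.getD c c := by
  induction gs generalizing d with
  | nil => simp
  | cons g t ih =>
    simp only [List.foldl_cons, List.reverse_cons, List.find?_append]
    rw [ih]
    cases hf : t.reverse.find? (pvMatches c) with
    | some g' => simp
    | none =>
      simp only [List.find?_singleton]
      rw [pvGetD_insertGroup]
      by_cases hm : pvMatches c g <;> simp [hm]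

-- ===== VERDICT (by name: the statement is the Claim_ definition above) =====
theorem replace_main_chars_spec : Claim_equal_replace_main_chars := by
  intro main_chars eq_chars _
  unfold Spec_replace_main_chars replace_main_chars replace_main_chars_alt
  have hmap : main_chars.toList.map
        (fun c => (eq_chars.foldl (fun d chars => pvInsertGroup d chars.toList) PySem.Dict.empty).getD c c)
      = main_chars.toList.map (pvRep ((eq_chars.map String.toList).reverse)) := by
    apply List.map_congr_left
    intro c _
    rw [← List.foldl_map]
    rw [pvGetD_foldl_eq_rep]
    unfold pvRep
    cases hf : List.find? (pvMatches c) (List.map String.toList eq_chars).reverse <;>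
      simp [PySem.Dict.getD, PySem.Dict.get?, PySem.Dict.empty]
  simp only [hmap]
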